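-- pv_equiv track=rewrite | github.com/leonmoouse/zidonghua | backend/main.py | _match_quadrant_key
-- ===== SOURCE A (Python) =====
-- from typing import Any, Dict, List
--
-- def _match_quadrant_key(key: str, mapping: Dict[str, set[str]]) -> str | None:
--     lowered = key.strip().lower()
--     for target, aliases in mapping.items():
--         lowered_aliases = {alias.lower() for alias in aliases}
--         lowered_aliases.add(target.lower())
--         if lowered in lowered_aliases:
--             return target
--     return None
-- ===== SOURCE B (Python) =====
-- def _match_quadrant_key(key, mapping):
--     index = {}
--     for target, aliases in mapping.items():
--         index.setdefault(target.lower(), target)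
--         for alias in aliases:
--             index.setdefault(alias.lower(), target)
--     return index.get(key.strip().lower())
-- ===== Notes on version B (the rewrite author's own statement) =====
-- stated objective: alternative
-- what changed: Replaces the per-target lowered-alias set construction and membership scan with a single precomputed reverse table (setdefault keeps first occurrences, preserving first-match order) followed by one dict lookup.
import Mathlib
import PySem

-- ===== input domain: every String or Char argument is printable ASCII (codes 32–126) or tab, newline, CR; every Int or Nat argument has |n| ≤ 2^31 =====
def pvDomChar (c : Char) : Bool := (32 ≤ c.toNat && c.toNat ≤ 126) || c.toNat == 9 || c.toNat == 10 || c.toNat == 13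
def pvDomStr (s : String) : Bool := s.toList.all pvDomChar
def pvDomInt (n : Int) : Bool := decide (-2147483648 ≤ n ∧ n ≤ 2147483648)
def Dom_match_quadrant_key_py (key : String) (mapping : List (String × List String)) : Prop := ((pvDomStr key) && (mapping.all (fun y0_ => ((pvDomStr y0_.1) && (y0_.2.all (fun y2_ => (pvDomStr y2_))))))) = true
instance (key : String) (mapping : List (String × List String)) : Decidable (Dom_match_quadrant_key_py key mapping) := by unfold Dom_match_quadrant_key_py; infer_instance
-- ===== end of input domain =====

-- B builds one reverse lookup table (first occurrence wins) and does a single dict lookup,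
-- instead of A's per-target lowered-alias set construction and scan; alternative decomposition, same cost.


-- ===== PORT A =====
-- the for-loop with early return, as structural recursion over mapping.items()
def matchQuadLoopA (lowered : String) : List (String × List String) → Option String
  | [] => none
  | (target, aliases) :: rest =>
      let lowered_aliases : PySem.Set String :=
        PySem.Set.add (PySem.Set.ofList (aliases.map PySem.Str.lower)) (PySem.Str.lower target)
      if PySem.Set.contains lowered_aliases lowered then some target
      else matchQuadLoopA lowered rest

def match_quadrant_key_py (key : String) (mapping : List (String × List String)) : Option String :=
  let lowered := PySem.Str.lower (PySem.Str.strip key)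
  matchQuadLoopA lowered mapping

-- ===== PORT B =====
-- build the reverse index: for each (target, aliases), setdefault target.lower() and each alias.lower()
def matchQuadIndexB (mapping : List (String × List String)) : PySem.Dict String String :=
  mapping.foldl
    (fun d p =>
      p.2.foldl (fun d a => d.setdefault (PySem.Str.lower a) p.1)
        (d.setdefault (PySem.Str.lower p.1) p.1))
    PySem.Dict.empty

def match_quadrant_key_py_alt (key : String) (mapping : List (String × List String)) : Option String :=
  (matchQuadIndexB mapping).get? (PySem.Str.lower (PySem.Str.strip key))

-- ===== PRECONDITION & SPEC =====
def Spec_match_quadrant_key_py (key : String) (mapping : List (String × List String)) (out : Option String) : Prop := out = match_quadrant_key_py_alt key mapping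
instance (key : String) (mapping : List (String × List String)) (out : Option String) : Decidable (Spec_match_quadrant_key_py key mapping out) := by unfold Spec_match_quadrant_key_py; infer_instance

-- ===== CLAIM (what is proved, stated in full; the proofs are below) =====
def Claim_equal_match_quadrant_key_py : Prop := ∀ (key : String) (mapping : List (String × List String)), Dom_match_quadrant_key_py key mapping → Spec_match_quadrant_key_py key mapping (match_quadrant_key_py key mapping)

-- ===== LEMMAS AND PROOFS =====

-- setdefault, seen from an arbitrary lookup key
theorem get?_setdefault_or (d : PySem.Dict String String) (k' v k : String) :
    (d.setdefault k' v).get? k = (d.get? k).or (if k = k' then some v else none) := by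
  by_cases hc : d.contains k' = true
  · rw [PySem.Dict.setdefault_of_contains _ _ hc]
    by_cases hk : k = k'
    · subst hk
      rw [PySem.Dict.contains_eq_isSome_get?] at hc
      cases h : d.get? k with
      | none => simp [h] at hc
      | some w => simp
    · simp [hk]
  · rw [PySem.Dict.setdefault_of_not_contains _ _ (by simpa using hc)]
    rw [PySem.Dict.get?_insert]
    by_cases hk : k = k'
    · subst hk
      rw [PySem.Dict.contains_eq_isSome_get?] at hc
      cases h : d.get? k with
      | none => simp
      | some w => simp [h] at hc
    · simp [hk]

-- the inner alias loop, seen from an arbitrary lookup key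
theorem get?_alias_fold (aliases : List String) (t : String) (d : PySem.Dict String String) (k : String) :
    (aliases.foldl (fun d a => d.setdefault (PySem.Str.lower a) t) d).get? k
      = (d.get? k).or (if k ∈ aliases.map PySem.Str.lower then some t else none) := by
  induction aliases generalizing d with
  | nil => simp
  | cons a rest ih =>
      simp only [List.foldl_cons, ih, get?_setdefault_or, Option.or_assoc, List.map_cons,
        List.mem_cons]
      congr 1
      by_cases h1 : k = PySem.Str.lower a <;> by_cases h2 : k ∈ rest.map PySem.Str.lower <;>
        simp [h1, h2]

-- the outer build loop equals A's scan, offset by the accumulator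
theorem get?_build (mapping : List (String × List String)) (d : PySem.Dict String String) (k : String) :
    (mapping.foldl
      (fun d p =>
        p.2.foldl (fun d a => d.setdefault (PySem.Str.lower a) p.1)
          (d.setdefault (PySem.Str.lower p.1) p.1)) d).get? k
      = (d.get? k).or (matchQuadLoopA k mapping) := by
  induction mapping generalizing d with
  | nil => simp [matchQuadLoopA]
  | cons p rest ih =>
      obtain ⟨target, aliases⟩ := p
      simp only [List.foldl_cons, ih, get?_alias_fold, get?_setdefault_or, Option.or_assoc]
      congr 1
      simp only [matchQuadLoopA]
      by_cases h1 : k = PySem.Str.lower target <;> by_cases h2 : k ∈ aliases.map PySem.Str.lower <;>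
        simp [h1, h2]

-- ===== VERDICT (by name: the statement is the Claim_ definition above) =====
theorem match_quadrant_key_py_spec : Claim_equal_match_quadrant_key_py := by
  intro key mapping _
  show match_quadrant_key_py key mapping = match_quadrant_key_py_alt key mapping
  simp [match_quadrant_key_py, match_quadrant_key_py_alt, matchQuadIndexB, get?_build]
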